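-- pv_equiv track=rewrite | github.com/arjun-chandupatla/bioinformatics | string_composition.py | kmers_composition
-- ===== SOURCE A (Python) =====
-- def kmers_composition(text:str, k:int) -> list[str]:
--     n = len(text)
--     kmers = []
--
--     if n == k:
--         return [text]
--
--     for x in range(n - k + 1):
--         kmers.append(text[x:x+k])
--     kmers.sort()
--     return kmers
-- ===== SOURCE B (Python) =====
-- def kmers_composition(text: str, k: int) -> list[str]:
--     # Count each k-mer once, sort only the distinct k-mers, then expand by multiplicity.
--     n = len(text)
--     counts = {}
--     for x in range(n - k + 1):
--         w = text[x:x + k]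
--         counts[w] = counts.get(w, 0) + 1
--     out = []
--     for w in sorted(counts):
--         out.extend([w] * counts[w])
--     return out
-- ===== Notes on version B (the rewrite author's own statement) =====
-- stated objective: alternative
-- what changed: B replaces A's build-all-windows-then-sort with a one-pass counter dict over the windows followed by sorting only the distinct k-mers and expanding each by its multiplicity.
import Mathlib
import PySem

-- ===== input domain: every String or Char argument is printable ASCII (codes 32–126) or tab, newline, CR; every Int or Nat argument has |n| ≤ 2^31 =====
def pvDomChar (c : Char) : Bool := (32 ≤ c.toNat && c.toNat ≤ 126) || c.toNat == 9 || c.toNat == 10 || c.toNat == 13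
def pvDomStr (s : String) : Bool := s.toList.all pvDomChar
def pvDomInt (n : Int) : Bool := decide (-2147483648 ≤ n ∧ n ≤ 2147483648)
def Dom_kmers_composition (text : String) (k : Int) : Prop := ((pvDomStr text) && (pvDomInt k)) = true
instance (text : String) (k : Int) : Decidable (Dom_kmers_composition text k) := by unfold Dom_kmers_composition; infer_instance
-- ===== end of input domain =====

-- B counts each k-mer in one pass and sorts only the DISTINCT k-mers, expanding by multiplicity
-- (alternative decomposition; same return value as A everywhere).

-- ===== PORT A =====
-- literal port of A: build all windows by slicing, append each, then sort the whole list;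
-- the n == k case returns [text] without sorting.
def kmers_composition (text : String) (k : Int) : List String :=
  let n : Int := PySem.Str.len text
  if n = k then [text]
  else
    let kmers : List String :=
      (PySem.List.pyRange 0 (n - k + 1) 1).foldl
        (fun acc x => acc ++ [PySem.Str.slice text (some x) (some (x + k))]) []
    PySem.List.sorted kmers (fun x => x) false

-- ===== PORT B =====
-- literal port of B: counter dict over the windows, then expand sorted(counts) by multiplicity.
def kmers_composition_alt (text : String) (k : Int) : List String :=
  let n : Int := PySem.Str.len text
  let counts : PySem.Dict String Int :=
    (PySem.List.pyRange 0 (n - k + 1) 1).foldl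
      (fun d x =>
        d.insert (PySem.Str.slice text (some x) (some (x + k)))
          (d.getD (PySem.Str.slice text (some x) (some (x + k))) 0 + 1))
      PySem.Dict.empty
  (PySem.List.sorted counts.keys (fun x => x) false).foldl
    (fun acc w => acc ++ List.replicate (counts.getD w 0).toNat w) []

-- ===== PRECONDITION & SPEC =====
def Spec_kmers_composition (text : String) (k : Int) (out : List String) : Prop := out = kmers_composition_alt text k
instance (text : String) (k : Int) (out : List String) : Decidable (Spec_kmers_composition text k out) := by unfold Spec_kmers_composition; infer_instance

-- ===== CLAIM (what is proved, stated in full; the proofs are below) =====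
def Claim_equal_kmers_composition : Prop := ∀ (text : String) (k : Int), Dom_kmers_composition text k → Spec_kmers_composition text k (kmers_composition text k)

-- ===== LEMMAS AND PROOFS =====

-- counting inside a flatMap of replicate-blocks over a duplicate-free key list
lemma count_flatMap_replicate (D : List String) (hD : D.Nodup) (c : String → Nat) (a : String) :
    (D.flatMap fun w => List.replicate (c w) w).count a = if a ∈ D then c a else 0 := by
  induction D with
  | nil => simp
  | cons w t ih =>
    rcases List.nodup_cons.mp hD with ⟨hw, ht⟩
    simp only [List.flatMap_cons, List.count_append, List.count_replicate, ih ht, List.mem_cons]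
    by_cases h : a = w
    · subst h; simp [hw]
    · simp [h, Ne.symm h]

-- a flatMap of replicate-blocks over a strictly increasing key list is weakly increasing
lemma pairwise_le_flatMap_replicate (D : List String) (h : D.Pairwise (· < ·)) (c : String → Nat) :
    (D.flatMap fun w => List.replicate (c w) w).Pairwise (· ≤ ·) := by
  induction D with
  | nil => simp
  | cons w t ih =>
    rcases List.pairwise_cons.mp h with ⟨hw, ht⟩
    simp only [List.flatMap_cons]
    refine List.pairwise_append.mpr ⟨List.pairwise_replicate.mpr (Or.inr le_rfl), ih ht, ?_⟩
    intro a ha b hb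
    obtain ⟨w', hw', hb'⟩ := List.mem_flatMap.mp hb
    rw [List.eq_of_mem_replicate ha, List.eq_of_mem_replicate hb']
    exact le_of_lt (hw w' hw')

-- the key fact: sorting a list with multiplicities = sorting its distinct elements and
-- expanding each by its count
lemma sorted_eq_expand (L : List String) :
    PySem.List.sorted L (fun x => x) false =
      (PySem.List.sorted (PySem.Set.ofList L) (fun x => x) false).flatMap
        (fun w => List.replicate (L.count w) w) := by
  have hD : (PySem.List.sorted (PySem.Set.ofList L) (fun x => x) false).Nodup :=
    (PySem.List.sorted_perm (PySem.Set.ofList L) (fun x => x) false).symm.nodup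
      (PySem.Set.nodup_ofList L)
  apply PySem.List.sorted_id_eq_of_perm_of_pairwise
  · rw [List.perm_iff_count]
    intro a
    rw [count_flatMap_replicate _ hD]
    by_cases ha : a ∈ L
    · simp [PySem.List.mem_sorted, PySem.Set.mem_ofList, ha]
    · simp [PySem.List.mem_sorted, PySem.Set.mem_ofList, ha,
        List.count_eq_zero_of_not_mem ha]
  · exact pairwise_le_flatMap_replicate _ (PySem.List.sorted_ofList_pairwise_lt _) _

-- B's fold over the range builds exactly Counter(windows)
lemma counts_eq_counter (text : String) (k : Int) :
    ((PySem.List.pyRange 0 (PySem.Str.len text - k + 1) 1).foldl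
      (fun d x =>
        d.insert (PySem.Str.slice text (some x) (some (x + k)))
          (d.getD (PySem.Str.slice text (some x) (some (x + k))) 0 + 1))
      PySem.Dict.empty) =
    PySem.Dict.counter ((PySem.List.pyRange 0 (PySem.Str.len text - k + 1) 1).map
      (fun x => PySem.Str.slice text (some x) (some (x + k)))) := by
  rw [← PySem.Dict.foldl_insert_getD_add_one_eq_counter, List.foldl_map]

-- B equals the expanded-sort form of the window list
lemma alt_eq_expand (text : String) (k : Int) :
    kmers_composition_alt text k =
      (PySem.List.sorted
          (PySem.Set.ofList ((PySem.List.pyRange 0 (PySem.Str.len text - k + 1) 1).map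
            (fun x => PySem.Str.slice text (some x) (some (x + k)))))
          (fun x => x) false).flatMap
        (fun w => List.replicate
          (((PySem.List.pyRange 0 (PySem.Str.len text - k + 1) 1).map
            (fun x => PySem.Str.slice text (some x) (some (x + k)))).count w) w) := by
  unfold kmers_composition_alt
  simp only [counts_eq_counter, PySem.Dict.keys_counter,
    PySem.List.foldl_append_eq_flatMap, List.nil_append]
  refine List.flatMap_congr ?_
  intro w _
  rw [PySem.Dict.getD_counter]
  simp

-- the window at 0 is the whole string when k = len(text)
lemma slice_full (text : String) :
    PySem.Str.slice text (some 0) (some (0 + PySem.Str.len text)) = text := by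
  simp [PySem.Str.slice, PySem.Str.len]
  rw [← String.length_toList, List.take_length]
  exact String.ofList_toList

-- ===== VERDICT (by name: the statement is the Claim_ definition above) =====
theorem kmers_composition_spec : Claim_equal_kmers_composition := by
  intro text k _
  unfold Spec_kmers_composition
  rw [alt_eq_expand, ← sorted_eq_expand]
  unfold kmers_composition
  by_cases h : PySem.Str.len text = k
  · simp only [h, ite_true]
    have h1 : k - k + 1 = 1 := by ring
    rw [h1]
    have h2 : PySem.List.pyRange 0 1 1 = [0] := by decide
    rw [h2, List.map_singleton, ← h, slice_full]
    exact (PySem.List.sorted_eq_self_of_pairwise [text] (fun x => x)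
      (List.pairwise_singleton _ _)).symm
  · simp only [if_neg h]
    rw [PySem.List.foldl_append_singleton_eq_map]
    simp
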